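-- pv_equiv track=rewrite | github.com/pretensor-ai/pretensor | src/pretensor/connectors/postgres.py | _pg_transitive_members
-- ===== SOURCE A (Python) =====
-- def _pg_transitive_members(children: dict[str, set[str]], root: str) -> set[str]:
--     """All roles (including ``root``) that are direct or indirect members of ``root``.
--
--     ``children[r]`` is the set of direct members of role ``r`` (PostgreSQL ``pg_auth_members``).
--     """
--     out: set[str] = {root}
--     stack = [root]
--     while stack:
--         parent = stack.pop()
--         for mbr in children.get(parent, ()):
--             if mbr not in out:
--                 out.add(mbr)
--                 stack.append(mbr)
--     return out
-- ===== SOURCE B (Python) =====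
-- def _pg_transitive_members(children: dict[str, set[str]], root: str) -> set[str]:
--     """All roles (including ``root``) that are direct or indirect members of ``root``.
--
--     Level-synchronous (frontier) BFS over whole sets instead of a node-at-a-time
--     DFS stack: each round unions the children of the entire frontier, keeps only
--     the not-yet-seen ones as the next frontier, and merges them into the result.
--     """
--     out = {root}
--     frontier = {root}
--     while frontier:
--         nxt = set()
--         for n in frontier:
--             nxt |= children.get(n, set())
--         frontier = nxt - out
--         out |= frontier
--     return out
-- ===== Notes on version B (the rewrite author's own statement) =====
-- stated objective: alternative
-- what changed: Replaces the node-at-a-time DFS stack with its per-member 'not in out' test by a level-synchronous frontier BFS that each round unions the children of the whole frontier, takes the set-difference with the seen set as the next frontier, and merges it in.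
import Mathlib
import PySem

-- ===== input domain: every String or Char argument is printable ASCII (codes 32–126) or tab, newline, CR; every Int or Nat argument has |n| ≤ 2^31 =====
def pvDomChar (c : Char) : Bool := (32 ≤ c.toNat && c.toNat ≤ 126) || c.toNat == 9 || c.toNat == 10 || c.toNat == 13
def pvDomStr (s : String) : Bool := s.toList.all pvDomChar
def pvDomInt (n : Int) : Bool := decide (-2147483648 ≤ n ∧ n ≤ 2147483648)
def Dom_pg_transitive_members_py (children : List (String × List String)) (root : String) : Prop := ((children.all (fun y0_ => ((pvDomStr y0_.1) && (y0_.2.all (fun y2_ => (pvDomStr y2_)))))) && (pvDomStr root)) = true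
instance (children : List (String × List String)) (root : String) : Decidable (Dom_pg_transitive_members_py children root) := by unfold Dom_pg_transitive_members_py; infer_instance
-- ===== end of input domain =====

-- B replaces A's node-at-a-time DFS stack by a level-synchronous frontier BFS over sets
-- (alternative decomposition, same asymptotic cost). Both Pythons return a SET (iteration
-- order unspecified, compared as a finite set); both ports therefore return the canonical
-- sorted list of that set's elements, so that list equality expresses set equality.

-- ===== PORT A =====
-- children.get(parent, ()) on the dict (association list, first match)
def pvChildrenGet (children : List (String × List String)) (p : String) : List String :=
  (PySem.Dict.mk children).getD p []

def pvDfsF (so : List String × PySem.Set String) (mbr : String) : List String × PySem.Set String :=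
  if PySem.Set.contains so.2 mbr then so else (so.1 ++ [mbr], PySem.Set.add so.2 mbr)

lemma pvDfsF_fold_spec (vs : List String) (st : List String) (out : PySem.Set String) :
    ∃ new, vs.foldl pvDfsF (st, out) = (st ++ new, out ++ new) ∧ new.Nodup ∧
      (∀ x ∈ new, x ∈ vs ∧ x ∉ out) ∧ (∀ m ∈ vs, m ∈ out ++ new) := by
  induction vs generalizing st out with
  | nil => exact ⟨[], by simp⟩
  | cons mbr rest ih =>
    by_cases h : mbr ∈ out
    · have hc : PySem.Set.contains out mbr = true := by simp [PySem.Set.contains, h]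
      obtain ⟨new, heq, hnd, hmem, hcov⟩ := ih st out
      refine ⟨new, ?_, hnd, fun x hx => ⟨List.mem_cons_of_mem _ (hmem x hx).1, (hmem x hx).2⟩, ?_⟩
      · simpa [List.foldl_cons, pvDfsF, PySem.Set.contains, h] using heq
      · intro m hm
        rcases List.mem_cons.1 hm with rfl | hm
        · exact List.mem_append_left _ h
        · exact hcov m hm
    · have hc : PySem.Set.contains out mbr = false := by simp [PySem.Set.contains, h]
      have hadd : PySem.Set.add out mbr = out ++ [mbr] := by
        simp [PySem.Set.add, PySem.Set.contains, h]
      obtain ⟨new, heq, hnd, hmem, hcov⟩ := ih (st ++ [mbr]) (out ++ [mbr])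
      refine ⟨mbr :: new, ?_, ?_, ?_, ?_⟩
      · simpa [List.foldl_cons, pvDfsF, PySem.Set.contains, h, hadd, List.append_assoc] using heq
      · exact List.nodup_cons.2 ⟨fun hmn => (hmem mbr hmn).2 (by simp), hnd⟩
      · intro x hx
        rcases List.mem_cons.1 hx with rfl | hx
        · exact ⟨by simp, h⟩
        · exact ⟨List.mem_cons_of_mem _ (hmem x hx).1,
            fun hxo => (hmem x hx).2 (List.mem_append_left _ hxo)⟩
      · intro m hm
        rcases List.mem_cons.1 hm with rfl | hm
        · simp
        · have := hcov m hm; simpa [List.append_assoc] using this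

-- termination helpers for the worklist loops (not part of either algorithm's result)
lemma pvFilterSublist (u : List String) (p q : String → Prop) [DecidablePred p] [DecidablePred q]
    (h : ∀ x ∈ u, q x → p x) :
    List.Sublist (u.filter (fun x => decide (q x))) (u.filter (fun x => decide (p x))) := by
  induction u with
  | nil => simp
  | cons y ys ih =>
    have ih' := ih (fun x hx => h x (List.mem_cons_of_mem _ hx))
    by_cases hqy : q y
    · have hpy : p y := h y (by simp) hqy
      simpa [hqy, hpy] using ih'.cons₂ y
    · by_cases hpy : p y
      · simpa [hqy, hpy] using ih'.cons y
      · simpa [hqy, hpy] using ih'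

lemma pvFilterStrict (u : List String) (p q : String → Prop) [DecidablePred p] [DecidablePred q]
    (h : ∀ x ∈ u, q x → p x) (a : String) (ha : a ∈ u) (hp : p a) (hq : ¬ q a) :
    (u.filter (fun x => decide (q x))).length < (u.filter (fun x => decide (p x))).length := by
  have hsub := pvFilterSublist u p q h
  rcases lt_or_eq_of_le hsub.length_le with hlt | heq
  · exact hlt
  · exfalso
    have : u.filter (fun x => decide (q x)) = u.filter (fun x => decide (p x)) := hsub.eq_of_length heq
    have hmem : a ∈ u.filter (fun x => decide (p x)) := List.mem_filter.2 ⟨ha, by simpa using hp⟩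
    rw [← this] at hmem
    exact hq (by simpa using (List.mem_filter.1 hmem).2)

lemma pvChildrenGet_subset (children : List (String × List String)) (p x : String)
    (h : x ∈ pvChildrenGet children p) : x ∈ children.flatMap (fun y => y.2) := by
  unfold pvChildrenGet PySem.Dict.getD PySem.Dict.get? at h
  cases hf : List.find? (fun pr => pr.1 == p) children with
  | none => simp [hf] at h
  | some pr =>
    simp only [hf, Option.map_some, Option.getD_some] at h
    exact List.mem_flatMap.2 ⟨pr, List.mem_of_find?_eq_some hf, h⟩

def pvRem (children : List (String × List String)) (out : PySem.Set String) : Nat :=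
  ((children.flatMap (fun y => y.2)).filter (fun x => decide (x ∉ out))).length

def pvDfsGo (children : List (String × List String)) (stack : List String)
    (out : PySem.Set String) : PySem.Set String :=
  if hs : stack = [] then out
  else
    let parent := stack.getLast hs
    let res := (pvChildrenGet children parent).foldl pvDfsF (stack.dropLast, out)
    pvDfsGo children res.1 res.2
termination_by (pvRem children out, stack.length)
decreasing_by
  obtain ⟨new, heq, hnd, hmem, hcov⟩ :=
    pvDfsF_fold_spec (pvChildrenGet children (stack.getLast hs)) stack.dropLast out
  rw [heq]
  cases new with
  | nil =>
    simp only [List.append_nil]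
    apply Prod.Lex.right
    have hlen : stack.length ≠ 0 := fun h => hs (List.length_eq_zero_iff.1 h)
    simp only [List.length_dropLast]
    omega
  | cons y ys =>
    apply Prod.Lex.left
    have hy := hmem y (by simp)
    exact pvFilterStrict _ (fun x => x ∉ out) (fun x => x ∉ out ++ y :: ys)
      (fun x _ hq hp => hq (List.mem_append_left _ hp))
      y (pvChildrenGet_subset children (stack.getLast hs) y hy.1) hy.2 (by simp)

-- A: out = {root}; stack = [root]; while stack: parent = stack.pop(); for mbr in get(parent): …
def pg_transitive_members_py (children : List (String × List String)) (root : String) :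
    List String :=
  PySem.List.sorted (pvDfsGo children [root] (PySem.Set.ofList [root])) (fun x => x)

-- ===== PORT B =====
lemma pvMemFoldlUnion (children : List (String × List String)) (frontier : List String)
    (acc : PySem.Set String) (x : String) :
    x ∈ frontier.foldl (fun acc n => PySem.Set.union acc (pvChildrenGet children n)) acc ↔
      x ∈ acc ∨ ∃ n ∈ frontier, x ∈ pvChildrenGet children n := by
  induction frontier generalizing acc with
  | nil => simp
  | cons n rest ih =>
    rw [List.foldl_cons, ih]
    rw [PySem.Set.mem_union]
    constructor
    · rintro (⟨hx | hx⟩ | ⟨m, hm, hx⟩)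
      · exact Or.inl hx
      · exact Or.inr ⟨n, by simp, hx⟩
      · exact Or.inr ⟨m, List.mem_cons_of_mem _ hm, hx⟩
    · rintro (hx | ⟨m, hm, hx⟩)
      · exact Or.inl (Or.inl hx)
      · rcases List.mem_cons.1 hm with rfl | hm
        · exact Or.inl (Or.inr hx)
        · exact Or.inr ⟨m, hm, hx⟩

def pvBfsNxt (children : List (String × List String)) (frontier : PySem.Set String) :
    PySem.Set String :=
  frontier.foldl (fun acc n => PySem.Set.union acc (pvChildrenGet children n)) PySem.Set.empty

def pvBfsGo (children : List (String × List String)) (out frontier : PySem.Set String) :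
    PySem.Set String :=
  if frontier = [] then out
  else
    let fr' := PySem.Set.diff (pvBfsNxt children frontier) out
    pvBfsGo children (PySem.Set.union out fr') fr'
termination_by pvRem children out + (if frontier = [] then 0 else 1)
decreasing_by
  rename_i hfr
  by_cases hf : (pvBfsNxt children frontier).diff out = []
  · simp only [hf]
    have hu : PySem.Set.union out [] = out := rfl
    rw [hu]
    simp [hfr]
  · rcases List.exists_mem_of_ne_nil _ hf with ⟨y, hy⟩
    have hy' := (PySem.Set.mem_diff _ out y).1 hy
    have hyn : y ∈ children.flatMap (fun z => z.2) := by
      rcases (pvMemFoldlUnion children frontier PySem.Set.empty y).1 hy'.1 with h0 | ⟨n, _, hn⟩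
      · simp [PySem.Set.empty] at h0
      · exact pvChildrenGet_subset children n y hn
    have hstrict := pvFilterStrict (children.flatMap (fun z => z.2))
      (fun x => x ∉ out)
      (fun x => x ∉ PySem.Set.union out ((pvBfsNxt children frontier).diff out))
      (fun x _ hq hp => hq ((PySem.Set.mem_union _ _ x).2 (Or.inl hp)))
      y hyn hy'.2 (fun hq => hq ((PySem.Set.mem_union _ _ y).2 (Or.inr hy)))
    simp only [pvRem] at *
    split <;> omega

-- B: out = frontier = {root}; while frontier: nxt = ⋃ children.get(n); frontier = nxt - out; out |= frontier
def pg_transitive_members_py_alt (children : List (String × List String)) (root : String) :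
    List String :=
  PySem.List.sorted (pvBfsGo children (PySem.Set.ofList [root]) (PySem.Set.ofList [root]))
    (fun x => x)

-- ===== PRECONDITION & SPEC =====
def Spec_pg_transitive_members_py (children : List (String × List String)) (root : String) (out : List String) : Prop := out = pg_transitive_members_py_alt children root
instance (children : List (String × List String)) (root : String) (out : List String) : Decidable (Spec_pg_transitive_members_py children root out) := by unfold Spec_pg_transitive_members_py; infer_instance

-- ===== CLAIM (what is proved, stated in full; the proofs are below) =====
def Claim_equal_pg_transitive_members_py : Prop := ∀ (children : List (String × List String)) (root : String), Dom_pg_transitive_members_py children root → Spec_pg_transitive_members_py children root (pg_transitive_members_py children root)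

-- ===== LEMMAS AND PROOFS =====
inductive pvReach (children : List (String × List String)) (root : String) : String → Prop
  | root : pvReach children root root
  | step {p m : String} : pvReach children root p → m ∈ pvChildrenGet children p →
      pvReach children root m

theorem pvDfsGo_spec (children : List (String × List String)) (root : String)
    (stack : List String) (out : PySem.Set String) :
    out.Nodup →
    (∀ p ∈ stack, p ∈ out) →
    (∀ x ∈ out, pvReach children root x) →
    (∀ p ∈ out, p ∈ stack ∨ ∀ m ∈ pvChildrenGet children p, m ∈ out) →
    root ∈ out →
    (pvDfsGo children stack out).Nodup ∧
      (∀ x, x ∈ pvDfsGo children stack out ↔ pvReach children root x) := by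
  induction stack, out using pvDfsGo.induct children with
  | case1 out =>
    intro hnd hsub hsound hinv hroot
    rw [pvDfsGo]
    refine ⟨hnd, fun x => ⟨hsound x, fun hr => ?_⟩⟩
    induction hr with
    | root => exact hroot
    | step hp hm ihr =>
      rcases hinv _ ihr with hin | hcl
      · simp at hin
      · exact hcl _ hm
  | case2 stack out hs parent res ih =>
    intro hnd hsub hsound hinv hroot
    rw [pvDfsGo]
    simp only [dif_neg hs]
    simp only [parent, res] at ih ⊢
    obtain ⟨new, heq, hnwnd, hnew, hcov⟩ :=
      pvDfsF_fold_spec (pvChildrenGet children (stack.getLast hs)) stack.dropLast out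
    rw [heq] at ih ⊢
    have hstack_eq : stack.dropLast ++ [stack.getLast hs] = stack := List.dropLast_append_getLast hs
    have hparent_out : stack.getLast hs ∈ out := hsub _ (List.getLast_mem hs)
    apply ih
    · -- nodup (out ++ new)
      exact List.Nodup.append hnd hnwnd (fun a ha hb => (hnew a hb).2 ha)
    · -- stack' ⊆ out'
      intro p hp
      rcases List.mem_append.1 hp with hp | hp
      · exact List.mem_append_left _ (hsub p ((List.dropLast_sublist stack).subset hp))
      · exact List.mem_append_right _ hp
    · -- soundness
      intro x hx
      rcases List.mem_append.1 hx with hx | hx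
      · exact hsound x hx
      · exact pvReach.step (hsound _ hparent_out) (hnew x hx).1
    · -- invariant
      intro p hp
      rcases List.mem_append.1 hp with hp | hp
      · rcases hinv p hp with hin | hcl
        · rw [← hstack_eq] at hin
          rcases List.mem_append.1 hin with hin | hin
          · exact Or.inl (List.mem_append_left _ hin)
          · right
            intro m hm
            have : p = stack.getLast hs := by simpa using hin
            subst this
            exact hcov m hm
        · exact Or.inr (fun m hm => List.mem_append_left _ (hcl m hm))
      · exact Or.inl (List.mem_append_right _ hp)
    · exact List.mem_append_left _ hroot

theorem pvBfsGo_spec (children : List (String × List String)) (root : String)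
    (out frontier : PySem.Set String) :
    out.Nodup →
    (∀ p ∈ frontier, p ∈ out) →
    (∀ x ∈ out, pvReach children root x) →
    (∀ p ∈ out, p ∈ frontier ∨ ∀ m ∈ pvChildrenGet children p, m ∈ out) →
    root ∈ out →
    (pvBfsGo children out frontier).Nodup ∧
      (∀ x, x ∈ pvBfsGo children out frontier ↔ pvReach children root x) := by
  induction out, frontier using pvBfsGo.induct children with
  | case1 out =>
    intro hnd hsub hsound hinv hroot
    rw [pvBfsGo, if_pos rfl]
    refine ⟨hnd, fun x => ⟨hsound x, fun hr => ?_⟩⟩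
    induction hr with
    | root => exact hroot
    | step hp hm ihr =>
      rcases hinv _ ihr with hin | hcl
      · simp at hin
      · exact hcl _ hm
  | case2 out frontier hf fr' ih =>
    intro hnd hsub hsound hinv hroot
    rw [pvBfsGo, if_neg hf]
    simp only [fr'] at ih ⊢
    have hmem_fr : ∀ x, x ∈ PySem.Set.diff (pvBfsNxt children frontier) out ↔
        ((∃ n ∈ frontier, x ∈ pvChildrenGet children n) ∧ x ∉ out) := by
      intro x
      rw [PySem.Set.mem_diff]
      constructor
      · rintro ⟨hx, hxo⟩
        rcases (pvMemFoldlUnion children frontier PySem.Set.empty x).1 hx with h0 | h1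
        · simp [PySem.Set.empty] at h0
        · exact ⟨h1, hxo⟩
      · rintro ⟨hx, hxo⟩
        exact ⟨(pvMemFoldlUnion children frontier PySem.Set.empty x).2 (Or.inr hx), hxo⟩
    apply ih
    · exact PySem.Set.nodup_union _ _ hnd
    · intro p hp
      exact (PySem.Set.mem_union _ _ p).2 (Or.inr hp)
    · intro x hx
      rcases (PySem.Set.mem_union _ _ x).1 hx with hx | hx
      · exact hsound x hx
      · obtain ⟨⟨n, hn, hxn⟩, -⟩ := (hmem_fr x).1 hx
        exact pvReach.step (hsound n (hsub n hn)) hxn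
    · intro p hp
      rcases (PySem.Set.mem_union _ _ p).1 hp with hpo | hpf
      · rcases hinv p hpo with hin | hcl
        · right
          intro m hm
          by_cases hmo : m ∈ out
          · exact (PySem.Set.mem_union _ _ m).2 (Or.inl hmo)
          · exact (PySem.Set.mem_union _ _ m).2
              (Or.inr ((hmem_fr m).2 ⟨⟨p, hin, hm⟩, hmo⟩))
        · exact Or.inr (fun m hm => (PySem.Set.mem_union _ _ m).2 (Or.inl (hcl m hm)))
      · exact Or.inl hpf
    · exact (PySem.Set.mem_union _ _ root).2 (Or.inl hroot)

theorem pg_transitive_members_py_eq (children : List (String × List String)) (root : String) :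
    pg_transitive_members_py children root = pg_transitive_members_py_alt children root := by
  have hinit_nd : (PySem.Set.ofList [root]).Nodup := PySem.Set.nodup_ofList [root]
  have hinit_mem : ∀ x, x ∈ PySem.Set.ofList [root] ↔ x = root := by
    intro x
    rw [PySem.Set.mem_ofList]
    simp
  have hd := pvDfsGo_spec children root [root] (PySem.Set.ofList [root]) hinit_nd
    (fun p hp => (hinit_mem p).2 (by simpa using hp))
    (fun x hx => by rw [hinit_mem x] at hx; subst hx; exact pvReach.root)
    (fun p hp => Or.inl (by simp [hinit_mem p |>.1 hp]))
    ((hinit_mem root).2 rfl)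
  have hb := pvBfsGo_spec children root (PySem.Set.ofList [root]) (PySem.Set.ofList [root]) hinit_nd
    (fun p hp => hp)
    (fun x hx => by rw [hinit_mem x] at hx; subst hx; exact pvReach.root)
    (fun p hp => Or.inl hp)
    ((hinit_mem root).2 rfl)
  have hperm : (pvDfsGo children [root] (PySem.Set.ofList [root])).Perm
      (pvBfsGo children (PySem.Set.ofList [root]) (PySem.Set.ofList [root])) :=
    (List.perm_ext_iff_of_nodup hd.1 hb.1).2 (fun a => (hd.2 a).trans ((hb.2 a).symm))
  have hsperm := PySem.List.sorted_perm (pvDfsGo children [root] (PySem.Set.ofList [root]))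
    (fun x => x) false
  have hsnd : (PySem.List.sorted (pvDfsGo children [root] (PySem.Set.ofList [root]))
      (fun x => x)).Nodup := hsperm.nodup_iff.2 hd.1
  have hple := PySem.List.sorted_pairwise (pvDfsGo children [root] (PySem.Set.ofList [root]))
    (fun x => x)
  have hplt : (PySem.List.sorted (pvDfsGo children [root] (PySem.Set.ofList [root]))
      (fun x => x)).Pairwise (fun a b => a < b) :=
    (hple.and hsnd).imp (fun h => lt_of_le_of_ne h.1 h.2)
  unfold pg_transitive_members_py pg_transitive_members_py_alt
  exact (PySem.List.sorted_eq_of_perm_of_pairwise_lt _ _ (fun x => x)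
    (hsperm.trans hperm) hplt).symm

-- ===== VERDICT (by name: the statement is the Claim_ definition above) =====
theorem pg_transitive_members_py_spec : Claim_equal_pg_transitive_members_py := by
  intro children root _
  unfold Spec_pg_transitive_members_py
  exact pg_transitive_members_py_eq children root
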